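-- pv_equiv track=rewrite | github.com/knitro/valo-discord-bot | valo_lineups_site.py | check_site
-- ===== SOURCE A (Python) =====
-- def check_site(input, map):
--     """Checks if a site input is valid or not based on the valorant map
--
--     Args:
--         input: the site string name to check against
--         map: the map string name to check against
--
--     Returns:
--         A tuple (bool, str) where bool is if the map name is valid,
--         and the str being the converted valid site name.
--     """
--     # Conforming to Uppercase Standard
--     input_upper = input.upper()
--     map_upper = map.upper()
--
--     # Check against actual names
--     maps_2_sites = [
--         "BIND", "SPLIT", "ASCENT", "ICEBOX", "BREEZE", "FRACTURE", "PEARL"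
--     ]
--     maps_3_sites = [
--         "HAVEN", "LOTUS"
--     ]
--     for name in maps_2_sites:
--         if name == map_upper:
--             if input_upper == "A" or input_upper == "B":
--                 return (True, input_upper)
--
--     for name in maps_3_sites:
--         if name == map_upper:
--             if input_upper == "A" or input_upper == "B" or input_upper == "C":
--                 return (True, input_upper)
--
--     # No matches at this point
--     return (False, "")
-- ===== SOURCE B (Python) =====
-- VALID_SITES = frozenset({
--     ("BIND", "A"), ("BIND", "B"),
--     ("SPLIT", "A"), ("SPLIT", "B"),
--     ("ASCENT", "A"), ("ASCENT", "B"),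
--     ("ICEBOX", "A"), ("ICEBOX", "B"),
--     ("BREEZE", "A"), ("BREEZE", "B"),
--     ("FRACTURE", "A"), ("FRACTURE", "B"),
--     ("PEARL", "A"), ("PEARL", "B"),
--     ("HAVEN", "A"), ("HAVEN", "B"), ("HAVEN", "C"),
--     ("LOTUS", "A"), ("LOTUS", "B"), ("LOTUS", "C"),
-- })
--
--
-- def check_site(input, map):
--     site = input.upper()
--     if (map.upper(), site) in VALID_SITES:
--         return (True, site)
--     return (False, "")
-- ===== Notes on version B (the rewrite author's own statement) =====
-- stated objective: simpler
-- what changed: Replaces A's two-stage classification (scan map lists per site-count group, then a per-group or-chain of letter tests) by a single membership test of the (map, site) pair in one flat table of all 20 valid combinations.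
import Mathlib
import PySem

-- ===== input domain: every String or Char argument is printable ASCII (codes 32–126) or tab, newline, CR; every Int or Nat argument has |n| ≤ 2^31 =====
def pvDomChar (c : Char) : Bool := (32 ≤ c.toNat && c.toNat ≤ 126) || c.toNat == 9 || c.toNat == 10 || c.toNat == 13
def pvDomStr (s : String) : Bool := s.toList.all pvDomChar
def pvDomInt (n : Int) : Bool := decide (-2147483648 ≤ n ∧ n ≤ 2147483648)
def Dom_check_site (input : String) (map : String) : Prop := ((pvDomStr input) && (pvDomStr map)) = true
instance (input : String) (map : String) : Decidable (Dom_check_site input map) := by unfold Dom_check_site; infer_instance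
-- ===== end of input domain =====

-- B replaces A's two-stage classification (scan map lists per site-count group, then a
-- per-group letter or-chain) by one membership test of the (map, site) pair in a flat
-- table of all 20 valid combinations (objective: simpler).

-- ===== PORT A =====
-- a 'for name in names:' loop with early return: some result on the first accepted site, else none
def pyForSites (names : List String) (map_upper : String) (valid : String → Bool)
    (input_upper : String) : Option (Bool × String) :=
  match names with
  | [] => none
  | name :: rest =>
    if name == map_upper then
      if valid input_upper then some (true, input_upper)
      else pyForSites rest map_upper valid input_upper
    else pyForSites rest map_upper valid input_upper

def check_site (input : String) (map : String) : Bool × String :=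
  let input_upper := PySem.Str.upper input
  let map_upper := PySem.Str.upper map
  let maps_2_sites := ["BIND", "SPLIT", "ASCENT", "ICEBOX", "BREEZE", "FRACTURE", "PEARL"]
  let maps_3_sites := ["HAVEN", "LOTUS"]
  match pyForSites maps_2_sites map_upper
      (fun s => s == "A" || s == "B") input_upper with
  | some r => r
  | none =>
    match pyForSites maps_3_sites map_upper
        (fun s => s == "A" || s == "B" || s == "C") input_upper with
    | some r => r
    | none => (false, "")

-- ===== PORT B =====
def VALID_SITES : PySem.Set (String × String) :=
  PySem.Set.ofList [
    ("BIND", "A"), ("BIND", "B"),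
    ("SPLIT", "A"), ("SPLIT", "B"),
    ("ASCENT", "A"), ("ASCENT", "B"),
    ("ICEBOX", "A"), ("ICEBOX", "B"),
    ("BREEZE", "A"), ("BREEZE", "B"),
    ("FRACTURE", "A"), ("FRACTURE", "B"),
    ("PEARL", "A"), ("PEARL", "B"),
    ("HAVEN", "A"), ("HAVEN", "B"), ("HAVEN", "C"),
    ("LOTUS", "A"), ("LOTUS", "B"), ("LOTUS", "C")]

def check_site_alt (input : String) (map : String) : Bool × String :=
  let site := PySem.Str.upper input
  if VALID_SITES.contains (PySem.Str.upper map, site) then (true, site)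
  else (false, "")

-- ===== PRECONDITION & SPEC =====
def Spec_check_site (input : String) (map : String) (out : Bool × String) : Prop := out = check_site_alt input map
instance (input : String) (map : String) (out : Bool × String) : Decidable (Spec_check_site input map out) := by unfold Spec_check_site; infer_instance

-- ===== CLAIM (what is proved, stated in full; the proofs are below) =====
def Claim_equal_check_site : Prop := ∀ (input : String) (map : String), Dom_check_site input map → Spec_check_site input map (check_site input map)

-- ===== LEMMAS AND PROOFS =====

theorem pyForSites_not_mem (names : List String) (mu : String) (valid : String → Bool)
    (iu : String) (hm : mu ∉ names) : pyForSites names mu valid iu = none := by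
  induction names with
  | nil => rfl
  | cons n rest ih =>
    simp only [List.mem_cons, not_or] at hm
    simp [pyForSites, Ne.symm hm.1, ih hm.2]

-- membership of a variable pair in the literal table, characterised
theorem mem_VALID_SITES (mu iu : String) :
    VALID_SITES.contains (mu, iu) =
      ((mu ∈ (["BIND", "SPLIT", "ASCENT", "ICEBOX", "BREEZE", "FRACTURE", "PEARL"] : List String)
          && (iu == "A" || iu == "B"))
        || (mu ∈ (["HAVEN", "LOTUS"] : List String)
          && (iu == "A" || iu == "B" || iu == "C"))) := by
  have : VALID_SITES = [
    ("BIND", "A"), ("BIND", "B"),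
    ("SPLIT", "A"), ("SPLIT", "B"),
    ("ASCENT", "A"), ("ASCENT", "B"),
    ("ICEBOX", "A"), ("ICEBOX", "B"),
    ("BREEZE", "A"), ("BREEZE", "B"),
    ("FRACTURE", "A"), ("FRACTURE", "B"),
    ("PEARL", "A"), ("PEARL", "B"),
    ("HAVEN", "A"), ("HAVEN", "B"), ("HAVEN", "C"),
    ("LOTUS", "A"), ("LOTUS", "B"), ("LOTUS", "C")] := by decide
  rw [this]
  simp only [PySem.Set.contains, List.contains_eq_mem, List.mem_cons, List.not_mem_nil,
    Prod.mk.injEq]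
  by_cases hA : iu = "A" <;> by_cases hB : iu = "B" <;> by_cases hC : iu = "C" <;>
    first
      | (simp [hA, hB, hC]; ac_rfl)
      | simp [hA, hB, hC]

-- ===== VERDICT (by name: the statement is the Claim_ definition above) =====
theorem check_site_spec : Claim_equal_check_site := by
  intro input map _
  unfold Spec_check_site check_site check_site_alt
  generalize PySem.Str.upper map = mu
  generalize PySem.Str.upper input = iu
  simp only [mem_VALID_SITES]
  by_cases h2 : mu ∈ (["BIND", "SPLIT", "ASCENT", "ICEBOX", "BREEZE", "FRACTURE", "PEARL"] : List String)
  · by_cases hv : (iu == "A" || iu == "B") = true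
    · have h3 : mu ∉ (["HAVEN", "LOTUS"] : List String) := by
        fin_cases h2 <;> decide
      fin_cases h2 <;> simp [pyForSites, hv]
    · have hv3 : ¬ (iu == "A" || iu == "B" || iu == "C") = true ∨
          mu ∉ (["HAVEN", "LOTUS"] : List String) := by
        right; fin_cases h2 <;> decide
      rcases hv3 with h | h
      · fin_cases h2 <;> simp_all [pyForSites]
      · fin_cases h2 <;>
          simp [pyForSites, hv, List.mem_cons]
  · by_cases h3 : mu ∈ (["HAVEN", "LOTUS"] : List String)
    · by_cases hv : (iu == "A" || iu == "B" || iu == "C") = true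
      · fin_cases h3 <;> simp [pyForSites, hv]
      · fin_cases h3 <;> simp [pyForSites, hv]
    · simp [pyForSites_not_mem _ _ _ _ h2, pyForSites_not_mem _ _ _ _ h3, h2, h3]
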